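-- pv_equiv track=rewrite | github.com/fayzullayevvvv/python-tuple | task01.py | find_oldest_person
-- ===== SOURCE A (Python) =====
-- def find_oldest_person(person):
--     if person:
--         name = person[0][0]
--         age = person[0][1]
--
--         for i, j in person:
--             if age < j:
--                 age = j
--                 name = i
--
--         return '{} {} yosh'.format(name, age)
-- ===== SOURCE B (Python) =====
-- def find_oldest_person(person):
--     if person:
--         oldest = max(j for _, j in person)
--         for name, age in person:
--             if age == oldest:
--                 return '{} {} yosh'.format(name, oldest)
-- ===== Notes on version B (the rewrite author's own statement) =====
-- stated objective: alternative
-- what changed: Replaces the running best-(name,age) pair loop with two independent passes: compute the maximum age with max(), then return at the first person carrying that age.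
import Mathlib
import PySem

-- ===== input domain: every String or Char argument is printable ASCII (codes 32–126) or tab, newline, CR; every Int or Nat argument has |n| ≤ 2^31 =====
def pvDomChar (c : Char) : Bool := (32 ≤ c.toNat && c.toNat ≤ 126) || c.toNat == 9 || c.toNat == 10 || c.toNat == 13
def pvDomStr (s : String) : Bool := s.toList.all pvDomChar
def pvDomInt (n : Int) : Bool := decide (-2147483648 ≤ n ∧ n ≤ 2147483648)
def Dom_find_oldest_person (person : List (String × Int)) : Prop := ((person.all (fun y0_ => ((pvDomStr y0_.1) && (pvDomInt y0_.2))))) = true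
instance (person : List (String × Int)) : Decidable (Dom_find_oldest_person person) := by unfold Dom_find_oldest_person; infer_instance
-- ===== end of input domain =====

-- B replaces A's running best-(name,age) loop by two passes: max() of the ages, then the
-- first person with that age ('alternative'; same O(n) cost).

-- ===== PORT A =====
-- the 'for i, j in person' loop carrying the running (name, age)
def pvLoopA : String → Int → List (String × Int) → String × Int
  | n, a, [] => (n, a)
  | n, a, (i, j) :: t => if a < j then pvLoopA i j t else pvLoopA n a t

def find_oldest_person (person : List (String × Int)) : Option String :=
  match person with
  | [] => none
  | (n0, a0) :: _ =>
    let (name, age) := pvLoopA n0 a0 person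
    some (name ++ " " ++ PySem.Int.toStr age ++ " yosh")

-- ===== PORT B =====
def find_oldest_person_alt (person : List (String × Int)) : Option String :=
  match person with
  | [] => none
  | _ :: _ =>
    match PySem.List.max? (person.map Prod.snd) (fun y => y) with
    | none => none  -- unreachable: person nonempty
    | some m =>
      -- the 'for name, age in person: if age == m: return …' loop
      match person.find? (fun p => p.2 == m) with
      | some (name, _) => some (name ++ " " ++ PySem.Int.toStr m ++ " yosh")
      | none => none  -- unreachable: the max occurs in person

-- ===== PRECONDITION & SPEC =====
def Spec_find_oldest_person (person : List (String × Int)) (out : Option String) : Prop := out = find_oldest_person_alt person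
instance (person : List (String × Int)) (out : Option String) : Decidable (Spec_find_oldest_person person out) := by unfold Spec_find_oldest_person; infer_instance

-- ===== CLAIM (what is proved, stated in full; the proofs are below) =====
def Claim_equal_find_oldest_person : Prop := ∀ (person : List (String × Int)), Dom_find_oldest_person person → Spec_find_oldest_person person (find_oldest_person person)

-- ===== LEMMAS AND PROOFS =====

-- running max of the ages of t starting from a
def pvM (t : List (String × Int)) (a : Int) : Int := t.foldl (fun m q => max m q.2) a

lemma pv_le_M : ∀ (t : List (String × Int)) (a : Int), a ≤ pvM t a := by
  intro t
  induction t with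
  | nil => intro a; simp [pvM]
  | cons h t ih =>
    intro a
    have := ih (max a h.2)
    have : a ≤ pvM t (max a h.2) := le_trans (le_max_left _ _) this
    simpa [pvM, List.foldl] using this

-- A's loop computes the first element of (n,a)::t whose age is the overall max
lemma pvLoopA_find : ∀ (t : List (String × Int)) (n : String) (a : Int),
    ((n, a) :: t).find? (fun p => p.2 == pvM t a) = some (pvLoopA n a t) := by
  intro t
  induction t with
  | nil => intro n a; simp [pvLoopA, pvM, List.find?]
  | cons h t ih =>
    intro n a
    obtain ⟨i, j⟩ := h
    by_cases hcmp : a < j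
    · have hmax : max a j = j := max_eq_right (le_of_lt hcmp)
      have hM : pvM ((i, j) :: t) a = pvM t j := by simp [pvM, List.foldl, hmax]
      have hne : a ≠ pvM t j := by
        have : a < pvM t j := lt_of_lt_of_le hcmp (pv_le_M t j)
        exact ne_of_lt this
      have := ih i j
      simp only [pvLoopA, hcmp, if_pos, hM]
      have hb : (a == pvM t j) = false := beq_eq_false_iff_ne.mpr hne
      simp only [List.find?] at this ⊢
      simp [hb, this]
    · have hj : j ≤ a := le_of_not_gt hcmp
      have hmax : max a j = a := max_eq_left hj
      have hM : pvM ((i, j) :: t) a = pvM t a := by simp [pvM, List.foldl, hmax]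
      have hIH := ih n a
      simp only [pvLoopA, hcmp, if_neg, not_false_iff, hM]
      by_cases ha : a = pvM t a
      · have hb : (a == pvM t a) = true := beq_iff_eq.mpr ha
        simp only [List.find?] at hIH ⊢
        simp [hb] at hIH ⊢
        exact hIH
      · have haM : a < pvM t a := lt_of_le_of_ne (pv_le_M t a) ha
        have hjne : j ≠ pvM t a := ne_of_lt (lt_of_le_of_lt hj haM)
        have hb : (a == pvM t a) = false := beq_eq_false_iff_ne.mpr ha
        have hjb : (j == pvM t a) = false := beq_eq_false_iff_ne.mpr hjne
        simp only [List.find?] at hIH ⊢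
        simp [hb, hjb] at hIH ⊢
        exact hIH

theorem find_oldest_person_spec : Claim_equal_find_oldest_person := by
  unfold Claim_equal_find_oldest_person Spec_find_oldest_person
  intro person _
  match person with
  | [] => rfl
  | (n0, a0) :: rest =>
    have hmax : PySem.List.max? (((n0, a0) :: rest).map Prod.snd) (fun y => y)
        = some (pvM rest a0) := by
      rw [List.map_cons, PySem.List.max?_id_cons]
      simp [pvM, List.foldl_map]
    have hfind := pvLoopA_find rest n0 a0
    have hloop : pvLoopA n0 a0 ((n0, a0) :: rest) = pvLoopA n0 a0 rest := by
      simp [pvLoopA]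
    -- the found element's age is the max
    have hsnd : (pvLoopA n0 a0 rest).2 = pvM rest a0 := by
      have := List.find?_some hfind
      simpa using this
    rcases hPA : pvLoopA n0 a0 rest with ⟨nm, ag⟩
    rw [hPA] at hfind hsnd
    simp only [find_oldest_person, find_oldest_person_alt, hmax, hloop, hPA, hfind, hsnd]
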